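-- pv_equiv track=rewrite | github.com/YonyUk/DAA_FINAL_EXAM | problem2/specific_instances_solutions.py | transitive_instance_solution
-- ===== SOURCE A (Python) =====
-- def transitive_instance_solution(robots):
--     """
--     cada elemento de 'robots' debe ser una tupla donde el primer elemento es la faccion,
--     y el segundo elemento es una lista donde la pieza i pertenece al fabricante en la posicion i de dicha lista
--     """
--     crews = {}
--     relations = set()
--     for i in range(len(robots)):
--         if not robots[i][0] in crews.keys():
--             crews[robots[i][0]] = [i]
--             pass
--         else:
--             crews[robots[i][0]].append(i)
--             pass
--         pass
--     for i in range(len(robots)):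
--         for j in range(i + 1,len(robots)):
--             for piece in robots[i][1]:
--                 if piece in robots[j][1]:
--                     relations.add((i,j))
--                     relations.add((j,i))
--                     break
--                 pass
--             pass
--         pass
--     crews = [crews[key] for key in crews.keys()]
--     robots = [i for i in range(len(robots))]
--     return _transitive_instance_solution(robots,crews,relations)
--
-- def _transitive_instance_solution(robots,crews,relations):
--
--     solution = []
--     crews_taken = []
--     for robot in robots:
--         if len(solution) == 0:
--             solution.append(robot)
--             for crew in crews:
--                 if robot in crew:
--                     crews_taken.append(crew)
--                     break
--                 pass
--             pass
--         elif len(solution) == len(crews):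
--             return True
--         else:
--             for crew in crews:
--                 if robot in crew and not crew in crews_taken:
--                     if (solution[0],robot) in relations:
--                         solution.append(robot)
--                         crews_taken.append(crew)
--                         break
--                     pass
--                 pass
--             pass
--         pass
--     return len(solution) == len(crews)
-- ===== SOURCE B (Python) =====
-- def transitive_instance_solution(robots):
--     """
--     cada elemento de 'robots' debe ser una tupla donde el primer elemento es la faccion,
--     y el segundo elemento es una lista donde la pieza i pertenece al fabricante en la posicion i de dicha lista
--     """
--     if not robots:
--         return True
--     f0, pieces0 = robots[0]
--     p0 = set(pieces0)
--     covered = {f0}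
--     for f, pieces in robots[1:]:
--         if f not in covered and not p0.isdisjoint(pieces):
--             covered.add(f)
--     return all(f in covered for f, _ in robots)
-- ===== Notes on version B (the rewrite author's own statement) =====
-- stated objective: faster
-- what changed: Instead of building an all-pairs relations set (O(n^2) pair tests, each O(m^2)) plus a crew partition and then running the greedy matching loop over crews, B observes that robot 0 always seeds the solution, so the answer is just: every faction has some robot sharing a piece with robot 0 (or is robot 0's faction); one set of robot 0's pieces and one linear pass over the other robots suffice.
import Mathlib
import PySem

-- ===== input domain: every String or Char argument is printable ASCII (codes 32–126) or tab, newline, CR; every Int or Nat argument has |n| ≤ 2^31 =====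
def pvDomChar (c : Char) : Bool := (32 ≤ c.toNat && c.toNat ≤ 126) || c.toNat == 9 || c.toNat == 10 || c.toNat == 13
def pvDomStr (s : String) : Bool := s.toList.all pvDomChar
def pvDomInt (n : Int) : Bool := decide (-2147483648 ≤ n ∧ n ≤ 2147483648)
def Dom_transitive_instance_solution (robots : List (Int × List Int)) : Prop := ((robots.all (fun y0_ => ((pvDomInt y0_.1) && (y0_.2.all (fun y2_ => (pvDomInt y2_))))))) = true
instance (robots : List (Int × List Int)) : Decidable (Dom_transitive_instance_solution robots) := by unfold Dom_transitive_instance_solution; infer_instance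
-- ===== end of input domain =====

-- B replaces A's all-pairs relations set + crew partition + greedy matching loop by one linear
-- pass: robot 0 always seeds the solution, so the answer is "every faction has a robot sharing a
-- piece with robot 0 (or is robot 0's faction)" — asymptotically faster.

-- ===== PORT A =====
-- 'for piece in pieces: if piece in ys: …; break' — the break-search fires iff some piece is shared
def pvShares (xs ys : List Int) : Bool := xs.any (fun p => ys.contains p)

-- first loop: crews[faction] = [i] / crews[faction].append(i)
def pvCrewsDict (robots : List (Int × List Int)) : PySem.Dict Int (List Int) :=
  (PySem.List.enumerate robots 0).foldl
    (fun d p => if !(d.contains p.2.1) then d.insert p.2.1 [p.1]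
                else d.modify p.2.1 [] (fun l => l ++ [p.1]))
    PySem.Dict.empty

-- inner loop 'for j in range(i+1, n)'
def pvRelInner (pieces : List Int) (i : Int) :
    List (Int × List Int) → Int → PySem.Set (Int × Int) → PySem.Set (Int × Int)
  | [], _, rel => rel
  | q :: rest, j, rel =>
      pvRelInner pieces i rest (j + 1)
        (if pvShares pieces q.2 then PySem.Set.add (PySem.Set.add rel (i, j)) (j, i) else rel)

-- outer loop 'for i in range(n)'
def pvRelAux : List (Int × List Int) → Int → PySem.Set (Int × Int) → PySem.Set (Int × Int)
  | [], _, rel => rel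
  | r :: rest, i, rel => pvRelAux rest (i + 1) (pvRelInner r.2 i rest (i + 1) rel)

-- _transitive_instance_solution: the 'for robot in robots' loop with its early 'return True'
def pvTransAux (crews : List (List Int)) (relations : PySem.Set (Int × Int)) :
    List Int → List Int → List (List Int) → Bool
  | [], solution, _ => solution.length == crews.length
  | robot :: rest, solution, taken =>
    if solution.length == 0 then
      -- 'for crew in crews: if robot in crew: crews_taken.append(crew); break'
      match crews.find? (fun crew => crew.contains robot) with
      | some crew => pvTransAux crews relations rest (solution ++ [robot]) (taken ++ [crew])
      | none => pvTransAux crews relations rest (solution ++ [robot]) taken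
    else if solution.length == crews.length then true
    else
      -- 'for crew in crews: if robot in crew and crew not in crews_taken:
      --      if (solution[0],robot) in relations: …; break'
      -- (solution ≠ [] in this branch, so solution[0] = solution.headD 0 exactly)
      match crews.find? (fun crew => crew.contains robot && !(taken.contains crew)
                           && PySem.Set.contains relations (solution.headD 0, robot)) with
      | some crew => pvTransAux crews relations rest (solution ++ [robot]) (taken ++ [crew])
      | none => pvTransAux crews relations rest solution taken

def transitive_instance_solution (robots : List (Int × List Int)) : Bool :=
  let crews := pvCrewsDict robots
  let relations := pvRelAux robots 0 PySem.Set.empty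
  let crewsList := crews.values
  let robots' := PySem.List.pyRange 0 (robots.length : Int) 1
  pvTransAux crewsList relations robots' [] []

-- ===== PORT B =====
-- the loop body of Source B: 'if f not in covered and not p0.isdisjoint(pieces): covered.add(f)'
def pvCoverStep (p0 : PySem.Set Int) (cov : PySem.Set Int) (r : Int × List Int) : PySem.Set Int :=
  if !(PySem.Set.contains cov r.1) && !(PySem.Set.isdisjoint p0 r.2) then PySem.Set.add cov r.1
  else cov

def transitive_instance_solution_alt (robots : List (Int × List Int)) : Bool :=
  match robots with
  | [] => true
  | (f0, pieces0) :: rest =>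
    let p0 : PySem.Set Int := PySem.Set.ofList pieces0
    let covered := rest.foldl (pvCoverStep p0) (PySem.Set.ofList [f0])
    ((f0, pieces0) :: rest).all (fun r => PySem.Set.contains covered r.1)

-- ===== PRECONDITION & SPEC =====
def Spec_transitive_instance_solution (robots : List (Int × List Int)) (out : Bool) : Prop := out = transitive_instance_solution_alt robots
instance (robots : List (Int × List Int)) (out : Bool) : Decidable (Spec_transitive_instance_solution robots out) := by unfold Spec_transitive_instance_solution; infer_instance

-- ===== CLAIM (what is proved, stated in full; the proofs are below) =====
def Claim_equal_transitive_instance_solution : Prop := ∀ (robots : List (Int × List Int)), Dom_transitive_instance_solution robots → Spec_transitive_instance_solution robots (transitive_instance_solution robots)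

-- ===== LEMMAS AND PROOFS =====

def pvFactions (robots : List (Int × List Int)) : PySem.Set Int :=
  PySem.Set.ofList (robots.map (·.1))
def pvIdxs (robots : List (Int × List Int)) (f : Int) : List Int :=
  ((PySem.List.enumerate robots 0).filter (fun p => p.2.1 == f)).map (·.1)

lemma pvCrewsDict_eq_modify (robots : List (Int × List Int)) :
  pvCrewsDict robots = (PySem.List.enumerate robots 0).foldl
    (fun d p => d.modify p.2.1 [] (fun l => l ++ [p.1])) PySem.Dict.empty := by
  unfold pvCrewsDict
  congr 1
  funext d p
  by_cases h : d.contains p.2.1 = true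
  · simp [h]
  · simp only [h, Bool.not_false, if_pos, PySem.Dict.modify,
      PySem.Dict.getD_of_not_contains d _ (by simpa using h)]
    simp

lemma pvCrewsDict_keys (robots : List (Int × List Int)) :
    (pvCrewsDict robots).keys = pvFactions robots := by
  rw [pvCrewsDict_eq_modify]
  rw [PySem.Dict.keys_foldl_modify_key (PySem.List.enumerate robots 0)
    (fun (p : Int × (Int × List Int)) => p.2.1) []
    (fun d (x : Int × (Int × List Int)) => (fun l => l ++ [x.1])) PySem.Dict.empty]
  have h2 : (PySem.List.enumerate robots 0).map (fun p => p.2.1) = robots.map (·.1) := by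
    calc (PySem.List.enumerate robots 0).map (fun p => p.2.1)
        = ((PySem.List.enumerate robots 0).map (·.2)).map (·.1) := by rw [List.map_map]; rfl
      _ = robots.map (·.1) := by rw [PySem.List.map_snd_enumerate]
  rw [h2]
  simp [PySem.Set.update_nil_left, pvFactions]

lemma pvCrewsDict_getD (robots : List (Int × List Int)) (f : Int) :
    (pvCrewsDict robots).getD f [] = pvIdxs robots f := by
  rw [pvCrewsDict_eq_modify]
  have hfold : (PySem.List.enumerate robots 0).foldl
      (fun d p => d.modify p.2.1 [] (fun l => l ++ [p.1])) PySem.Dict.empty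
      = ((PySem.List.enumerate robots 0).map (fun (p : Int × (Int × List Int)) => (p.2.1, p.1))).foldl
        (fun d q => d.modify q.1 [] (fun l => l ++ [q.2])) PySem.Dict.empty := by
    rw [List.foldl_map]
  rw [hfold, PySem.Dict.getD_foldl_modify_append]
  simp [pvIdxs, List.filter_map, List.map_map]
  rfl

lemma pvCrewsDict_values (robots : List (Int × List Int)) :
    (pvCrewsDict robots).values = (pvFactions robots).map (pvIdxs robots) := by
  have hnd : (pvCrewsDict robots).keys.Nodup := by
    rw [pvCrewsDict_eq_modify]
    exact PySem.Dict.nodup_keys_foldl_modify_key _ (fun (p : Int × (Int × List Int)) => p.2.1) []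
      (fun d (x : Int × (Int × List Int)) => (fun l => l ++ [x.1])) _ (by simp)
  rw [PySem.Dict.values_eq_map_keys _ hnd [], pvCrewsDict_keys]
  exact List.map_congr_left (fun f _ => pvCrewsDict_getD robots f)

lemma mem_pvIdxs (robots : List (Int × List Int)) (f x : Int) :
    x ∈ pvIdxs robots f ↔ ∃ (k : Nat) (_ : k < robots.length), x = (k : Int) ∧ robots[k].1 = f := by
  unfold pvIdxs
  simp only [List.mem_map, List.mem_filter, PySem.List.mem_enumerate_iff]
  constructor
  · rintro ⟨p, ⟨⟨k, hk, rfl⟩, hf⟩, rfl⟩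
    exact ⟨k, hk, by simp, by simpa using hf⟩
  · rintro ⟨k, hk, rfl, hf⟩
    exact ⟨(0 + (k : Int), robots[k]), ⟨⟨k, hk, rfl⟩, by simpa using hf⟩, by simp⟩

lemma pvIdxs_contains (robots : List (Int × List Int)) (f : Int) (k : Nat) (hk : k < robots.length) :
    (pvIdxs robots f).contains (k : Int) = (robots[k].1 == f) := by
  by_cases h : robots[k].1 = f
  · simp only [h, BEq.rfl]
    rw [List.contains_iff_mem]
    exact (mem_pvIdxs robots f _).2 ⟨k, hk, rfl, h⟩
  · have : ¬ ((k : Int) ∈ pvIdxs robots f) := by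
      rw [mem_pvIdxs]
      rintro ⟨k', hk', hkk', hf⟩
      have : k' = k := by exact_mod_cast hkk'.symm
      exact h (this ▸ hf)
    simp [this, beq_eq_false_iff_ne, h]

lemma pvIdxs_nonempty (robots : List (Int × List Int)) {f : Int} (hf : f ∈ pvFactions robots) :
    ∃ x, x ∈ pvIdxs robots f := by
  rw [pvFactions, PySem.Set.mem_ofList, List.mem_map] at hf
  obtain ⟨r, hr, hrf⟩ := hf
  obtain ⟨k, hk, hrk⟩ := List.mem_iff_getElem.1 hr
  exact ⟨(k : Int), (mem_pvIdxs robots f _).2 ⟨k, hk, rfl, by rw [hrk, hrf]⟩⟩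

lemma pvIdxs_inj (robots : List (Int × List Int)) {f g : Int}
    (hf : f ∈ pvFactions robots) (h : pvIdxs robots f = pvIdxs robots g) : f = g := by
  obtain ⟨x, hx⟩ := pvIdxs_nonempty robots hf
  obtain ⟨k, hk, rfl, hkf⟩ := (mem_pvIdxs robots f x).1 hx
  have hx' : (k : Int) ∈ pvIdxs robots g := h ▸ hx
  obtain ⟨k', hk', hkk', hkg⟩ := (mem_pvIdxs robots g _).1 hx'
  have : k' = k := by exact_mod_cast hkk'.symm
  subst this
  rw [← hkf, ← hkg]

lemma find?_of_unique {α : Type} (p : α → Bool) (l : List α) (a : α) (ha : a ∈ l)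
    (hp : p a = true) (huniq : ∀ x ∈ l, p x = true → x = a) : l.find? p = some a := by
  induction l with
  | nil => cases ha
  | cons y ys ih =>
    rcases List.mem_cons.1 ha with rfl | hmem
    · simp [hp]
    · by_cases hy : p y = true
      · have : y = a := huniq y (List.mem_cons_self) hy
        subst this; simp [hy]
      · simp only [List.find?_cons, Bool.not_eq_true] at *
        rw [hy]
        exact ih hmem (fun x hx => huniq x (List.mem_cons_of_mem _ hx))

lemma mem_pvRelInner (pieces : List Int) (i : Int) (l : List (Int × List Int)) (j : Int)
    (rel : PySem.Set (Int × Int)) (x : Int × Int) :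
    x ∈ pvRelInner pieces i l j rel ↔
      x ∈ rel ∨ ∃ (k : Nat) (_ : k < l.length),
        pvShares pieces l[k].2 = true ∧ (x = (i, j + k) ∨ x = (j + k, i)) := by
  induction l generalizing j rel with
  | nil => simp [pvRelInner]
  | cons q qs ih =>
    rw [pvRelInner, ih]
    by_cases hq : pvShares pieces q.2 = true
    · simp only [hq, if_pos, PySem.Set.mem_add]
      constructor
      · rintro (((hx | rfl) | rfl) | ⟨k, hk, hs, hx⟩)
        · exact Or.inl hx
        · exact Or.inr ⟨0, by simp, by simpa using hq, by simp⟩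
        · exact Or.inr ⟨0, by simp, by simpa using hq, by simp⟩
        · refine Or.inr ⟨k + 1, by simpa using hk, by simpa using hs, ?_⟩
          rcases hx with rfl | rfl
          · exact Or.inl (by simp; ring_nf)
          · exact Or.inr (by simp; ring_nf)
      · rintro (hx | ⟨k, hk, hs, hx⟩)
        · exact Or.inl (Or.inl (Or.inl hx))
        · match k with
          | 0 =>
            rcases hx with rfl | rfl
            · exact Or.inl (Or.inl (Or.inr (by simp)))
            · exact Or.inl (Or.inr (by simp))
          | k + 1 =>
            refine Or.inr ⟨k, by simpa using hk, by simpa using hs, ?_⟩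
            rcases hx with rfl | rfl
            · exact Or.inl (by simp; ring_nf)
            · exact Or.inr (by simp; ring_nf)
    · simp only [hq, if_neg, Bool.not_eq_true]
      constructor
      · rintro (hx | ⟨k, hk, hs, hx⟩)
        · exact Or.inl hx
        · refine Or.inr ⟨k + 1, by simpa using hk, by simpa using hs, ?_⟩
          rcases hx with rfl | rfl
          · exact Or.inl (by simp; ring_nf)
          · exact Or.inr (by simp; ring_nf)
      · rintro (hx | ⟨k, hk, hs, hx⟩)
        · exact Or.inl hx
        · match k with
          | 0 => simp at hs; exact absurd hs hq
          | k + 1 =>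
            refine Or.inr ⟨k, by simpa using hk, by simpa using hs, ?_⟩
            rcases hx with rfl | rfl
            · exact Or.inl (by simp; ring_nf)
            · exact Or.inr (by simp; ring_nf)

lemma subset_pvRelAux (l : List (Int × List Int)) (i : Int) (rel : PySem.Set (Int × Int))
    (x : Int × Int) (hx : x ∈ rel) : x ∈ pvRelAux l i rel := by
  induction l generalizing i rel with
  | nil => simpa [pvRelAux] using hx
  | cons r rest ih =>
    rw [pvRelAux]
    exact ih _ _ ((mem_pvRelInner _ _ _ _ _ _).2 (Or.inl hx))

lemma mem_pvRelAux_lower (l : List (Int × List Int)) (i : Int) (rel : PySem.Set (Int × Int))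
    (x : Int × Int) (hx : x ∈ pvRelAux l i rel) : x ∈ rel ∨ (i ≤ x.1 ∧ i ≤ x.2) := by
  induction l generalizing i rel with
  | nil => exact Or.inl (by simpa [pvRelAux] using hx)
  | cons r rest ih =>
    rw [pvRelAux] at hx
    rcases ih _ _ hx with hin | ⟨h1, h2⟩
    · rcases (mem_pvRelInner _ _ _ _ _ _).1 hin with hr | ⟨k, hk, hs, hx'⟩
      · exact Or.inl hr
      · right
        rcases hx' with rfl | rfl <;> constructor <;> simp <;> omega
    · exact Or.inr ⟨by omega, by omega⟩

lemma mem_pvRelAux_zero (f0 : Int) (ps0 : List Int) (rest : List (Int × List Int)) (r : Int) :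
    (0, r) ∈ pvRelAux ((f0, ps0) :: rest) 0 PySem.Set.empty ↔
      ∃ (k : Nat) (_ : k < rest.length), pvShares ps0 rest[k].2 = true ∧ r = (1 + k : Int) := by
  rw [pvRelAux]
  constructor
  · intro hx
    rcases mem_pvRelAux_lower _ _ _ _ hx with hin | ⟨h1, _⟩
    · rcases (mem_pvRelInner _ _ _ _ _ _).1 hin with hr | ⟨k, hk, hs, hx'⟩
      · simp [PySem.Set.empty] at hr
      · rcases hx' with h | h
        · exact ⟨k, hk, hs, by simpa using congrArg Prod.snd h⟩
        · exfalso
          have := congrArg Prod.fst h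
          simp at this
          omega
    · simp at h1
  · rintro ⟨k, hk, hs, rfl⟩
    apply subset_pvRelAux
    exact (mem_pvRelInner _ _ _ _ _ _).2 (Or.inr ⟨k, hk, hs, Or.inl (by simp)⟩)

lemma pvShares_eq_not_isdisjoint (ps ys : List Int) :
    pvShares ps ys = !(PySem.Set.isdisjoint (PySem.Set.ofList ps) ys) := by
  have key : PySem.Set.isdisjoint (PySem.Set.ofList ps) ys = true ↔ ¬ (pvShares ps ys = true) := by
    rw [PySem.Set.isdisjoint_iff]
    constructor
    · intro hall hsh
      rcases List.any_eq_true.1 hsh with ⟨p, hp, hpy⟩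
      exact hall p ((PySem.Set.mem_ofList ps p).2 hp) (by simpa using hpy)
    · intro hn p hp hpy
      exact hn (List.any_eq_true.2 ⟨p, (PySem.Set.mem_ofList ps p).1 hp, by simpa using hpy⟩)
  cases h : pvShares ps ys
  · have hd : PySem.Set.isdisjoint (PySem.Set.ofList ps) ys = true := key.2 (by simp [h])
    rw [hd]; rfl
  · have hd : PySem.Set.isdisjoint (PySem.Set.ofList ps) ys = false := by
      cases hdd : PySem.Set.isdisjoint (PySem.Set.ofList ps) ys
      · rfl
      · exact absurd h (by simpa using key.1 hdd)
    rw [hd]; rfl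

lemma pvCoverStep_cases (p0 : PySem.Set Int) (cov : PySem.Set Int) (r : Int × List Int) :
    pvCoverStep p0 cov r = cov ∨
      (r.1 ∉ cov ∧ pvCoverStep p0 cov r = cov ++ [r.1]) := by
  unfold pvCoverStep
  split_ifs with h
  · rw [Bool.and_eq_true] at h
    obtain ⟨h1, _⟩ := h
    have hnm : r.1 ∉ cov := by
      simp only [Bool.not_eq_true'] at h1
      intro hm
      rw [(PySem.Set.contains_iff cov r.1).2 hm] at h1
      cases h1
    exact Or.inr ⟨hnm, PySem.Set.add_of_not_mem hnm⟩
  · exact Or.inl rfl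

lemma foldl_coverStep_sub (p0 : PySem.Set Int) (l : List (Int × List Int)) (cov : PySem.Set Int) :
    cov ⊆ l.foldl (pvCoverStep p0) cov := by
  induction l generalizing cov with
  | nil => simp
  | cons r rest ih =>
    rw [List.foldl_cons]
    refine List.Subset.trans ?_ (ih _)
    rcases pvCoverStep_cases p0 cov r with h | ⟨_, h⟩ <;> rw [h] <;> simp

lemma foldl_coverStep_nodup (p0 : PySem.Set Int) (l : List (Int × List Int)) (cov : PySem.Set Int)
    (h : cov.Nodup) : (l.foldl (pvCoverStep p0) cov).Nodup := by
  induction l generalizing cov with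
  | nil => exact h
  | cons r rest ih =>
    rw [List.foldl_cons]
    refine ih _ ?_
    rcases pvCoverStep_cases p0 cov r with hh | ⟨hnm, hh⟩ <;> rw [hh]
    · exact h
    · exact List.Nodup.append h (List.nodup_singleton _)
        (by simpa [List.disjoint_singleton] using hnm)

lemma foldl_coverStep_factions (robots : List (Int × List Int)) (p0 : PySem.Set Int) :
    ∀ (l : List (Int × List Int)) (cov : PySem.Set Int),
    (∀ r ∈ l, r.1 ∈ pvFactions robots) → (∀ f ∈ cov, f ∈ pvFactions robots) →
    ∀ f ∈ l.foldl (pvCoverStep p0) cov, f ∈ pvFactions robots := by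
  intro l
  induction l with
  | nil => intro cov _ hc; exact hc
  | cons r rest ih =>
    intro cov hl hc
    rw [List.foldl_cons]
    refine ih _ (fun r' hr' => hl r' (List.mem_cons_of_mem _ hr')) ?_
    rcases pvCoverStep_cases p0 cov r with hh | ⟨hnm, hh⟩ <;> rw [hh]
    · exact hc
    · intro f hf
      rcases List.mem_append.1 hf with hf | hf
      · exact hc f hf
      · simp at hf
        exact hf ▸ hl r List.mem_cons_self

lemma subset_nodup_len_iff (a b : List Int) (ha : a.Nodup) (hb : b.Nodup) (hab : a ⊆ b) :
    b.length = a.length ↔ ∀ x ∈ b, x ∈ a := by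
  constructor
  · intro hlen x hx
    have hsub : a.toFinset ⊆ b.toFinset := fun y hy =>
      List.mem_toFinset.2 (hab (List.mem_toFinset.1 hy))
    have hcard : b.toFinset.card ≤ a.toFinset.card := by
      rw [List.toFinset_card_of_nodup ha, List.toFinset_card_of_nodup hb, hlen]
    have heq := Finset.eq_of_subset_of_card_le hsub hcard
    exact List.mem_toFinset.1 (heq ▸ List.mem_toFinset.2 hx)
  · intro hba
    have h1 : a.length ≤ b.length := (List.subperm_of_subset ha hab).length_le
    have h2 : b.length ≤ a.length :=
      (List.subperm_of_subset hb (fun x hx => hba x hx)).length_le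
    omega

lemma alt_eq_decide (f0 : Int) (ps0 : List Int) (rest : List (Int × List Int)) :
    transitive_instance_solution_alt ((f0, ps0) :: rest)
      = decide ((pvFactions ((f0, ps0) :: rest)).length
          = (rest.foldl (pvCoverStep (PySem.Set.ofList ps0)) [f0]).length) := by
  have hof : (PySem.Set.ofList [f0] : PySem.Set Int) = [f0] := rfl
  set robots := (f0, ps0) :: rest with hrob
  set covered := rest.foldl (pvCoverStep (PySem.Set.ofList ps0)) [f0] with hcov
  have hf0 : f0 ∈ pvFactions robots := by
    rw [pvFactions, PySem.Set.mem_ofList]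
    exact List.mem_map.2 ⟨(f0, ps0), List.mem_cons_self, rfl⟩
  have hndc : covered.Nodup := foldl_coverStep_nodup _ _ _ (List.nodup_singleton _)
  have hndf : (pvFactions robots).Nodup := PySem.Set.nodup_ofList _
  have hsubc : ∀ f ∈ covered, f ∈ pvFactions robots := by
    refine foldl_coverStep_factions robots _ rest [f0] ?_ ?_
    · intro r hr
      rw [pvFactions, PySem.Set.mem_ofList]
      exact List.mem_map.2 ⟨r, List.mem_cons_of_mem _ hr, rfl⟩
    · intro f hf; simp at hf; exact hf ▸ hf0
  have hiff := subset_nodup_len_iff covered (pvFactions robots) hndc hndf hsubc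
  rw [transitive_instance_solution_alt]
  simp only [← hcov, hof]
  rw [Bool.eq_iff_iff]
  simp only [List.all_eq_true, decide_eq_true_eq]
  rw [hiff]
  constructor
  · intro hall f hf
    rw [pvFactions, PySem.Set.mem_ofList, List.mem_map] at hf
    obtain ⟨r, hr, rfl⟩ := hf
    have := hall r hr
    rwa [PySem.Set.contains_iff] at this
  · intro hall r hr
    rw [PySem.Set.contains_iff]
    refine hall r.1 ?_
    rw [pvFactions, PySem.Set.mem_ofList]
    exact List.mem_map.2 ⟨r, hr, rfl⟩

lemma headD_append (solution : List Int) (hne : solution ≠ []) (y : Int) :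
    (solution ++ [y]).headD 0 = solution.headD 0 := by
  cases solution with
  | nil => exact absurd rfl hne
  | cons a t => rfl

lemma taken_contains_iff (robots : List (Int × List Int)) (cov : List Int)
    (hsub : ∀ g ∈ cov, g ∈ pvFactions robots) (f : Int) (_hf : f ∈ pvFactions robots) :
    ((cov.map (pvIdxs robots)).contains (pvIdxs robots f) = true) ↔ f ∈ cov := by
  rw [List.contains_iff_mem, List.mem_map]
  constructor
  · rintro ⟨g, hg, hgf⟩
    exact (pvIdxs_inj robots (hsub g hg) hgf) ▸ hg
  · intro h
    exact ⟨f, h, rfl⟩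

lemma pvTransAux_loop (f0 : Int) (ps0 : List Int) (rest : List (Int × List Int)) :
    ∀ (l : List (Int × List Int)) (s : Int) (cov solution : List Int) (taken : List (List Int)),
    (∀ p ∈ PySem.List.enumerate l s, ∃ (k : Nat) (_ : k < ((f0, ps0) :: rest).length),
        p.1 = (k : Int) ∧ 1 ≤ k ∧ ((f0, ps0) :: rest)[k] = p.2) →
    (∀ r ∈ l, r.1 ∈ pvFactions ((f0, ps0) :: rest)) →
    solution.length = cov.length → solution.headD 0 = 0 → solution ≠ [] →
    taken = cov.map (pvIdxs ((f0, ps0) :: rest)) → cov.Nodup →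
    (∀ f ∈ cov, f ∈ pvFactions ((f0, ps0) :: rest)) →
    pvTransAux ((pvFactions ((f0, ps0) :: rest)).map (pvIdxs ((f0, ps0) :: rest)))
        (pvRelAux ((f0, ps0) :: rest) 0 PySem.Set.empty)
        ((PySem.List.enumerate l s).map (·.1)) solution taken
      = decide ((pvFactions ((f0, ps0) :: rest)).length
          = (l.foldl (pvCoverStep (PySem.Set.ofList ps0)) cov).length) := by
  set robots := (f0, ps0) :: rest with hrob
  intro l
  induction l with
  | nil =>
    intro s cov solution taken _ _ hsol _ _ _ _ _
    simp only [PySem.List.enumerate_nil, List.map_nil, pvTransAux, List.foldl_nil,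
      List.length_map, hsol]
    rw [Bool.eq_iff_iff]
    simp only [beq_iff_eq, decide_eq_true_eq]
    omega
  | cons x xs ih =>
    intro s cov solution taken hl hlf hsol hhd hne htaken hndc hsubc
    obtain ⟨k, hk, hs_eq0, hk1, hx0⟩ := hl (s, x) (by rw [PySem.List.enumerate_cons]; exact List.mem_cons_self)
    have hs_eq : s = (k : Int) := hs_eq0
    have hx : robots[k] = x := hx0
    have hl' : ∀ p ∈ PySem.List.enumerate xs (s + 1), ∃ (k : Nat) (_ : k < robots.length),
        p.1 = (k : Int) ∧ 1 ≤ k ∧ robots[k] = p.2 := by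
      intro p hp
      exact hl p (by rw [PySem.List.enumerate_cons]; exact List.mem_cons_of_mem _ hp)
    have hlf' : ∀ r ∈ xs, r.1 ∈ pvFactions robots :=
      fun r hr => hlf r (List.mem_cons_of_mem _ hr)
    have hx1 : x.1 ∈ pvFactions robots := hlf x List.mem_cons_self
    -- the relations fact for this robot
    obtain ⟨k', rfl⟩ : ∃ k', k = k' + 1 := ⟨k - 1, by omega⟩
    have hrelc : PySem.Set.contains (pvRelAux robots 0 PySem.Set.empty) (0, s)
        = pvShares ps0 x.2 := by
      have hk' : k' < rest.length := by simp [hrob] at hk; omega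
      have hxr : rest[k']'hk' = x := by
        rw [← hx]
        simp [hrob]
      rw [Bool.eq_iff_iff, PySem.Set.contains_iff, hrob, hs_eq, mem_pvRelAux_zero]
      constructor
      · rintro ⟨j, hj, hsh, hkj⟩
        have : j = k' := by push_cast at hkj; omega
        subst this
        rwa [hxr] at hsh
      · intro hsh
        exact ⟨k', hk', by rwa [hxr], by push_cast; ring⟩
    rw [PySem.List.enumerate_cons, List.map_cons, pvTransAux]
    have hlen0 : (solution.length == 0) = false := by
      simp [List.length_eq_zero_iff, hne]
    rw [hlen0]
    simp only [Bool.false_eq_true, if_false]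
    by_cases hfull : cov.length = (pvFactions robots).length
    · have hcond : (solution.length == ((pvFactions robots).map (pvIdxs robots)).length) = true := by
        simp [hsol, hfull]
      rw [hcond]
      simp only [if_true]
      -- the final cover still has exactly |factions| elements
      have hsub2 : cov ⊆ (x :: xs).foldl (pvCoverStep (PySem.Set.ofList ps0)) cov :=
        foldl_coverStep_sub _ _ _
      have hnd2 : ((x :: xs).foldl (pvCoverStep (PySem.Set.ofList ps0)) cov).Nodup :=
        foldl_coverStep_nodup _ _ _ hndc
      have hsubf : ∀ f ∈ (x :: xs).foldl (pvCoverStep (PySem.Set.ofList ps0)) cov,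
          f ∈ pvFactions robots := foldl_coverStep_factions robots _ _ _ hlf hsubc
      have h1 : cov.length ≤ ((x :: xs).foldl (pvCoverStep (PySem.Set.ofList ps0)) cov).length :=
        (List.subperm_of_subset hndc hsub2).length_le
      have h2 : ((x :: xs).foldl (pvCoverStep (PySem.Set.ofList ps0)) cov).length
          ≤ (pvFactions robots).length :=
        (List.subperm_of_subset hnd2 hsubf).length_le
      rw [Bool.eq_iff_iff]
      simp only [decide_eq_true_eq]
      constructor
      · intro _; omega
      · intro _; trivial
    · have hcond : (solution.length == ((pvFactions robots).map (pvIdxs robots)).length) = false := by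
        simp [hsol, hfull]
      rw [hcond]
      simp only [Bool.false_eq_true, if_false]
      rw [hhd]
      cases hsh : pvShares ps0 x.2 with
      | false =>
        have hnone : ((pvFactions robots).map (pvIdxs robots)).find?
            (fun crew => crew.contains s && !(taken.contains crew)
              && PySem.Set.contains (pvRelAux robots 0 PySem.Set.empty) (0, s)) = none := by
          apply List.find?_eq_none.2
          intro crew _
          rw [hrelc, hsh]
          simp
        rw [hnone]
        have hstep : pvCoverStep (PySem.Set.ofList ps0) cov x = cov := by
          unfold pvCoverStep
          rw [← pvShares_eq_not_isdisjoint, hsh]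
          simp
        rw [List.foldl_cons, hstep]
        exact ih (s + 1) cov solution taken hl' hlf' hsol hhd hne htaken hndc hsubc
      | true =>
        have hcont : ∀ f, (pvIdxs robots f).contains s = (x.1 == f) := by
          intro f
          rw [hs_eq, pvIdxs_contains robots f (k' + 1) hk, hx]
        by_cases hmem : x.1 ∈ cov
        · have hnone : ((pvFactions robots).map (pvIdxs robots)).find?
              (fun crew => crew.contains s && !(taken.contains crew)
                && PySem.Set.contains (pvRelAux robots 0 PySem.Set.empty) (0, s)) = none := by
            apply List.find?_eq_none.2
            intro crew hcrew
            obtain ⟨f, hf, rfl⟩ := List.mem_map.1 hcrew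
            rw [hcont f]
            by_cases hfx : x.1 = f
            · subst hfx
              have hct : (taken.contains (pvIdxs robots x.1)) = true := by
                rw [htaken]
                exact (taken_contains_iff robots cov hsubc x.1 hx1).2 hmem
              simp only [hct]
              simp
            · simp [hfx]
          rw [hnone]
          have hstep : pvCoverStep (PySem.Set.ofList ps0) cov x = cov := by
            unfold pvCoverStep
            rw [(PySem.Set.contains_iff cov x.1).2 hmem]
            simp
          rw [List.foldl_cons, hstep]
          exact ih (s + 1) cov solution taken hl' hlf' hsol hhd hne htaken hndc hsubc
        · have hsome : ((pvFactions robots).map (pvIdxs robots)).find?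
              (fun crew => crew.contains s && !(taken.contains crew)
                && PySem.Set.contains (pvRelAux robots 0 PySem.Set.empty) (0, s))
              = some (pvIdxs robots x.1) := by
            rw [List.find?_map]
            rw [find?_of_unique _ _ x.1 hx1 ?_ ?_]
            · rfl
            · show ((pvIdxs robots x.1).contains s && !(taken.contains (pvIdxs robots x.1))
                && PySem.Set.contains (pvRelAux robots 0 PySem.Set.empty) (0, s)) = true
              rw [hcont, hrelc, hsh]
              have hcf : (taken.contains (pvIdxs robots x.1)) = false := by
                rw [htaken]
                rw [← Bool.not_eq_true]
                intro hc
                exact hmem ((taken_contains_iff robots cov hsubc x.1 hx1).1 hc)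
              simp only [hcf]
              simp
            · intro f hf hpf
              rw [Function.comp_apply] at hpf
              rw [hcont f] at hpf
              rw [Bool.and_eq_true] at hpf
              obtain ⟨h1, _⟩ := hpf
              rw [Bool.and_eq_true] at h1
              obtain ⟨h2, _⟩ := h1
              exact (eq_of_beq h2).symm
          rw [hsome]
          have hstep : pvCoverStep (PySem.Set.ofList ps0) cov x = cov ++ [x.1] := by
            unfold pvCoverStep
            rw [← pvShares_eq_not_isdisjoint, hsh]
            have hc : (PySem.Set.contains cov x.1) = false := by
              rw [← Bool.not_eq_true]
              intro hc
              exact hmem ((PySem.Set.contains_iff cov x.1).1 hc)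
            rw [hc]
            simp [PySem.Set.add_of_not_mem hmem]
          rw [List.foldl_cons, hstep]
          refine ih (s + 1) (cov ++ [x.1]) (solution ++ [s]) (taken ++ [pvIdxs robots x.1])
            hl' hlf' ?_ ?_ ?_ ?_ ?_ ?_
          · simp [hsol]
          · exact (headD_append solution hne s).trans hhd
          · simp
          · rw [htaken]; simp
          · exact List.Nodup.append hndc (List.nodup_singleton _)
              (by simpa [List.disjoint_singleton] using hmem)
          · intro f hf
            rcases List.mem_append.1 hf with hf | hf
            · exact hsubc f hf
            · simp at hf
              exact hf ▸ hx1

lemma pvA_eq_alt : ∀ (robots : List (Int × List Int)),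
    transitive_instance_solution robots = transitive_instance_solution_alt robots := by
  intro robots
  match robots with
  | [] => decide
  | (f0, ps0) :: rest =>
    set robots := (f0, ps0) :: rest with hrob
    have hlen : (robots.length : Int) = 1 + (rest.length : Int) := by simp [hrob]; omega
    have hf0 : f0 ∈ pvFactions robots := by
      rw [pvFactions, PySem.Set.mem_ofList]
      exact List.mem_map.2 ⟨(f0, ps0), List.mem_cons_self, rfl⟩
    rw [transitive_instance_solution, pvCrewsDict_values]
    have hcons : PySem.List.pyRange 0 (robots.length : Int) 1
        = 0 :: PySem.List.pyRange 1 (robots.length : Int) 1 := by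
      rw [PySem.List.pyRange_one_cons (by rw [hlen]; omega)]
      norm_num
    rw [hcons, pvTransAux]
    have h00 : (([] : List Int).length == 0) = true := by decide
    rw [h00]
    simp only [if_true]
    have hfind : ((pvFactions robots).map (pvIdxs robots)).find?
        (fun crew => crew.contains 0) = some (pvIdxs robots f0) := by
      apply find?_of_unique
      · exact List.mem_map.2 ⟨f0, hf0, rfl⟩
      · show (pvIdxs robots f0).contains ((0 : Nat) : Int) = true
        rw [pvIdxs_contains robots f0 0 (by simp [hrob])]
        simp [hrob]
      · intro crew hcrew hp
        obtain ⟨f, hf, rfl⟩ := List.mem_map.1 hcrew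
        have : (pvIdxs robots f).contains ((0 : Nat) : Int) = true := hp
        rw [pvIdxs_contains robots f 0 (by simp [hrob])] at this
        have : robots[0].1 = f := eq_of_beq this
        simp [hrob] at this
        rw [← this]
    have hrange : PySem.List.pyRange 1 (robots.length : Int) 1
        = (PySem.List.enumerate rest 1).map (·.1) := by
      rw [PySem.List.map_fst_enumerate, hlen]
    have := pvTransAux_loop f0 ps0 rest rest 1 [f0] [0] [pvIdxs robots f0]
      (by
        intro p hp
        rw [PySem.List.mem_enumerate_iff] at hp
        obtain ⟨j, hj, rfl⟩ := hp
        refine ⟨j + 1, by simp; omega, by push_cast; ring, by omega, by simp⟩)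
      (by
        intro r hr
        rw [pvFactions, PySem.Set.mem_ofList]
        exact List.mem_map.2 ⟨r, List.mem_cons_of_mem _ hr, rfl⟩)
      (by simp) (by simp) (by simp) (by simp [hrob]) (List.nodup_singleton _)
      (by intro f hf; simp at hf; subst hf; exact hf0)
    rw [← hrob] at this
    rw [hfind, hrange]
    show pvTransAux ((pvFactions robots).map (pvIdxs robots)) (pvRelAux robots 0 PySem.Set.empty)
        ((PySem.List.enumerate rest 1).map (·.1)) [0] [pvIdxs robots f0]
      = transitive_instance_solution_alt robots
    rw [this, hrob, alt_eq_decide]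

-- ===== VERDICT (by name: the statement is the Claim_ definition above) =====
theorem transitive_instance_solution_spec : Claim_equal_transitive_instance_solution := by
  intro robots _
  show transitive_instance_solution robots = transitive_instance_solution_alt robots
  exact pvA_eq_alt robots
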